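-- pv_equiv track=rewrite | github.com/mok-lab/novel_concept_learning_fMRI | localiser_task/create_scrambled.py | partition_into_groups
-- ===== SOURCE A (Python) =====
-- from typing import List, Dict, Tuple, Optional
--
-- def partition_into_groups(items: List[str], n_groups: int) -> List[List[str]]:
--     """Split items into n_groups, spreading modulo items over early groups."""
--     n = len(items)
--     base = n // n_groups
--     rem = n % n_groups
--     groups = []
--     start = 0
--     for g in range(n_groups):
--         k = base + (1 if g < rem else 0)
--         groups.append(items[start:start + k])
--         start += k
--     return groups
-- ===== SOURCE B (Python) =====
-- def partition_into_groups(items, n_groups):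
--     """Split items into n_groups, spreading modulo items over early groups."""
--     groups = []
--     it = iter(items)
--     rem = len(items)
--     for g in range(n_groups, 0, -1):
--         k = -(-rem // g)  # ceiling fair share of what is left
--         groups.append([next(it) for _ in range(k)])
--         rem -= k
--     return groups
-- ===== Notes on version B (the rewrite author's own statement) =====
-- stated objective: alternative
-- what changed: Replaced the single loop that precomputes base/rem once and threads a running start offset with a recursion on n_groups that at each step recomputes the fair share as the ceiling of remaining_items/remaining_groups, splits off that prefix and recurses on the rest; no global base/rem and no accumulator exist in B.
import Mathlib
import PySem

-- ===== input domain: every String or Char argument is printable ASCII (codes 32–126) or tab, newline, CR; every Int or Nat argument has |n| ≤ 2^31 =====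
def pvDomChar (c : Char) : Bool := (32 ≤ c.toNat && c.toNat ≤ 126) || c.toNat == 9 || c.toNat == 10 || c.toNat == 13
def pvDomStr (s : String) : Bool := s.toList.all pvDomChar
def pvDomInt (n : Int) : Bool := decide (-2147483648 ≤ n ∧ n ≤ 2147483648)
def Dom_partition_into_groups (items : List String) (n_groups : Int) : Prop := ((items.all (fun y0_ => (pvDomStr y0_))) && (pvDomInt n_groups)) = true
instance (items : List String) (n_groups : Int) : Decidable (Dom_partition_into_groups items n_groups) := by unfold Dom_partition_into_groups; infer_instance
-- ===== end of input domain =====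

-- B replaces A's precomputed base/rem loop with a running start offset by a countdown
-- over remaining groups that consumes the items through an iterator, recomputing the
-- ceiling fair share of the remaining items each step; objective: alternative.


-- ===== PORT A =====
def partition_into_groups (items : List String) (n_groups : Int) : List (List String) :=
  let n : Int := items.length
  let base := PySem.Int.floordiv n n_groups
  let rem := PySem.Int.mod n n_groups
  ((PySem.List.pyRange 0 n_groups 1).foldl
    (fun (st : List (List String) × Int) g =>
      let k := base + (if g < rem then (1 : Int) else 0)
      (st.1 ++ [PySem.List.slice items (some st.2) (some (st.2 + k))], st.2 + k))
    ([], 0)).1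

-- ===== PORT B =====
-- iterator 'it' is the not-yet-consumed suffix; '[next(it) for _ in range(k)]' is take/drop of it
def partition_into_groups_alt (items : List String) (n_groups : Int) : List (List String) :=
  ((PySem.List.pyRange n_groups 0 (-1)).foldl
    (fun (st : List (List String) × List String × Int) g =>
      let k := -(PySem.Int.floordiv (-st.2.2) g)
      (st.1 ++ [st.2.1.take k.toNat], st.2.1.drop k.toNat, st.2.2 - k))
    ([], items, (items.length : Int))).1

-- ===== PRECONDITION & SPEC =====
-- Pre_ excludes exactly n_groups = 0, where Python A raises ZeroDivisionError.
def Pre_partition_into_groups (items : List String) (n_groups : Int) : Prop := n_groups ≠ 0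
instance (items : List String) (n_groups : Int) : Decidable (Pre_partition_into_groups items n_groups) := by unfold Pre_partition_into_groups; infer_instance
def pvWitness_partition_into_groups : List String × Int := (["a", "b", "c"], 2)

def Spec_partition_into_groups (items : List String) (n_groups : Int) (out : List (List String)) : Prop := out = partition_into_groups_alt items n_groups
instance (items : List String) (n_groups : Int) (out : List (List String)) : Decidable (Spec_partition_into_groups items n_groups out) := by unfold Spec_partition_into_groups; infer_instance

-- ===== CLAIM (what is proved, stated in full; the proofs are below) =====
def Claim_equal_partition_into_groups : Prop := ∀ (items : List String) (n_groups : Int), Dom_partition_into_groups items n_groups → Pre_partition_into_groups items n_groups → Spec_partition_into_groups items n_groups (partition_into_groups items n_groups)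

-- ===== LEMMAS AND PROOFS =====

-- Canonical chunk list: both ports are proved equal to this proof-only helper.
def chunkAux (xs : List String) : Nat → List (List String)
  | 0 => []
  | m + 1 =>
      xs.take ((xs.length + m) / (m + 1)) ::
        chunkAux (xs.drop ((xs.length + m) / (m + 1))) m

-- Loop invariant for A's fold: result is the map of closed-form slices, start = m*base + min m rem.
theorem pv_fold_inv (items : List String) (base rem : Int) (hrem : 0 ≤ rem) (m : Nat) :
    ((PySem.List.pyRange 0 (m : Int) 1).foldl
      (fun (st : List (List String) × Int) g =>
        let k := base + (if g < rem then (1 : Int) else 0)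
        (st.1 ++ [PySem.List.slice items (some st.2) (some (st.2 + k))], st.2 + k))
      ([], 0))
    = ((PySem.List.pyRange 0 (m : Int) 1).map
        (fun g => PySem.List.slice items (some (g * base + min g rem))
                                         (some ((g + 1) * base + min (g + 1) rem))),
       (m : Int) * base + min (m : Int) rem) := by
  induction m with
  | zero =>
      simp [PySem.List.pyRange_one_eq_nil (by omega : (0:Int) ≤ 0)]
      omega
  | succ m ih =>
      have hcast : ((m + 1 : Nat) : Int) = (m : Int) + 1 := by push_cast; ring
      rw [hcast, PySem.List.pyRange_one_succ_right (by positivity), List.foldl_append,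
        List.map_append, ih]
      simp only [List.foldl_cons, List.foldl_nil, List.map_cons, List.map_nil, Prod.mk.injEq]
      constructor
      · congr 3
        by_cases h : (m : Int) < rem
        · rw [if_pos h, min_eq_left (by omega : (m : Int) ≤ rem),
            min_eq_left (by omega : (m : Int) + 1 ≤ rem)]
          ring_nf
        · rw [if_neg h, min_eq_right (by omega : rem ≤ (m : Int)),
            min_eq_right (by omega : rem ≤ (m : Int) + 1)]
          ring_nf
      · by_cases h : (m : Int) < rem
        · rw [if_pos h, min_eq_left (by omega : (m : Int) ≤ rem),
            min_eq_left (by omega : (m : Int) + 1 ≤ rem)]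
          ring_nf
        · rw [if_neg h, min_eq_right (by omega : rem ≤ (m : Int)),
            min_eq_right (by omega : rem ≤ (m : Int) + 1)]
          ring_nf

-- Arithmetic: the ceiling share equals base + (1 if rem > 0 else 0).
theorem pv_ceil_share (n m : Nat) :
    (n + m) / (m + 1) = n / (m + 1) + min 1 (n % (m + 1)) := by
  have h1 := Nat.div_add_mod n (m + 1)
  have h2 : n % (m + 1) < m + 1 := Nat.mod_lt _ (by omega)
  rcases Nat.eq_zero_or_pos (n % (m + 1)) with h | h
  · have : n + m = (m + 1) * (n / (m + 1)) + m := by omega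
    rw [this, Nat.mul_add_div (by omega)]
    simp [h, Nat.div_eq_of_lt (by omega : m < m + 1)]
  · have : n + m = (m + 1) * (n / (m + 1)) + (n % (m + 1) + m) := by omega
    rw [this, Nat.mul_add_div (by omega)]
    have : (n % (m + 1) + m) / (m + 1) = 1 := by
      apply Nat.div_eq_of_lt_le <;> omega
    omega

-- ceiling-share value of A's floordiv/mod, via the characterisation lemma
theorem pv_ceil_floordiv (n m : Nat) :
    -(PySem.Int.floordiv (-((n : Nat) : Int)) (((m + 1 : Nat)) : Int))
      = (((n + m) / (m + 1) : Nat) : Int) := by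
  have hpos : (0 : Int) < ((m + 1 : Nat) : Int) := by push_cast; omega
  rw [PySem.Int.neg_floordiv_neg_eq_iff_of_pos hpos]
  have h := Nat.div_add_mod (n + m) (m + 1)
  rw [Nat.mul_comm] at h
  have key : (((n + m) / (m + 1) : Nat) : Int) * ((m + 1 : Nat) : Int)
      + (((n + m) % (m + 1) : Nat) : Int) = (n : Int) + (m : Int) := by exact_mod_cast h
  have h2 : (((n + m) % (m + 1) : Nat) : Int) ≤ (m : Int) := by
    have := Nat.mod_lt (n + m) (y := m + 1) (by omega)
    exact_mod_cast (by omega : (n + m) % (m + 1) ≤ m)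
  constructor
  · have expand : ((((n + m) / (m + 1) : Nat) : Int) - 1) * ((m + 1 : Nat) : Int)
        = (((n + m) / (m + 1) : Nat) : Int) * ((m + 1 : Nat) : Int) - ((m + 1 : Nat) : Int) := by
      ring
    rw [expand]
    have hm1 : ((m + 1 : Nat) : Int) = (m : Int) + 1 := by push_cast; ring
    rw [hm1] at key ⊢
    have hmod0 : (0 : Int) ≤ (((n + m) % (m + 1) : Nat) : Int) := by positivity
    linarith
  · linarith

-- slicing with shifted natural bounds is slicing the dropped list
theorem pv_slice_shift (xs : List String) (a b q : Nat) :
    PySem.List.slice xs (some ((a + q : Nat) : Int)) (some ((b + q : Nat) : Int))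
      = PySem.List.slice (xs.drop q) (some ((a : Nat) : Int)) (some ((b : Nat) : Int)) := by
  rw [PySem.List.slice_natCast, PySem.List.slice_natCast, List.drop_drop]
  congr 1
  · omega
  · congr 1
    omega

-- B's countdown fold equals the canonical chunk list.
theorem pv_alt_fold : ∀ (m : Nat) (acc : List (List String)) (rest : List String),
    ((PySem.List.pyRange (m : Int) 0 (-1)).foldl
      (fun (st : List (List String) × List String × Int) g =>
        let k := -(PySem.Int.floordiv (-st.2.2) g)
        (st.1 ++ [st.2.1.take k.toNat], st.2.1.drop k.toNat, st.2.2 - k))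
      (acc, rest, (rest.length : Int))).1 = acc ++ chunkAux rest m := by
  intro m
  induction m with
  | zero =>
      intro acc rest
      simp only [Nat.cast_zero]
      rw [PySem.List.pyRange_neg_one_eq_nil (by omega : (0:Int) ≤ 0)]
      simp [chunkAux]
  | succ m ih =>
      intro acc rest
      rw [PySem.List.pyRange_neg_one_cons (by push_cast; omega : (0:Int) < ((m + 1 : Nat) : Int))]
      rw [List.foldl_cons]
      simp only
      set q := (rest.length + m) / (m + 1) with hq
      have hceil : -(PySem.Int.floordiv (-((rest.length : Nat) : Int)) ((m + 1 : Nat) : Int))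
          = ((q : Nat) : Int) := pv_ceil_floordiv rest.length m
      have hqle : q ≤ rest.length := by
        rw [hq, Nat.div_le_iff_le_mul_add_pred (by omega)]
        have h := Nat.le_mul_of_pos_left rest.length (show 0 < m + 1 by omega)
        omega
      rw [hceil]
      have htn : ((q : Nat) : Int).toNat = q := Int.toNat_natCast q
      rw [htn]
      have hlen : ((rest.length : Nat) : Int) - ((q : Nat) : Int)
          = (((rest.drop q).length : Nat) : Int) := by
        simp; omega
      have hstep : ((m + 1 : Nat) : Int) - 1 = (m : Int) := by push_cast; ring
      rw [hlen, hstep, ih]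
      rw [chunkAux, ← hq]
      simp

-- A's closed-form slice map equals the canonical chunk list.
theorem pv_map_eq_chunk : ∀ (m : Nat) (xs : List String),
    ((PySem.List.pyRange 0 (m : Int) 1).map
      (fun g => PySem.List.slice xs
        (some (g * PySem.Int.floordiv (xs.length : Int) (m : Int)
               + min g (PySem.Int.mod (xs.length : Int) (m : Int))))
        (some ((g + 1) * PySem.Int.floordiv (xs.length : Int) (m : Int)
               + min (g + 1) (PySem.Int.mod (xs.length : Int) (m : Int))))))
    = chunkAux xs m := by
  intro m
  induction m with
  | zero =>
      intro xs
      simp [PySem.List.pyRange_one_eq_nil (by omega : (0:Int) ≤ 0), chunkAux]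
  | succ m ih =>
      intro xs
      have hB : PySem.Int.floordiv (xs.length : Int) ((m + 1 : Nat) : Int)
          = ((xs.length / (m + 1) : Nat) : Int) :=
        PySem.Int.floordiv_natCast xs.length (m + 1)
      have hR : PySem.Int.mod (xs.length : Int) ((m + 1 : Nat) : Int)
          = ((xs.length % (m + 1) : Nat) : Int) :=
        PySem.Int.mod_natCast xs.length (m + 1)
      set n := xs.length with hn
      set base := n / (m + 1) with hbase
      set r := n % (m + 1) with hrdef
      set q := (n + m) / (m + 1) with hqdef
      have hqv : q = base + min 1 r := pv_ceil_share n m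
      have hrlt : r < m + 1 := Nat.mod_lt _ (by omega)
      have hnd : (m + 1) * base + r = n := Nat.div_add_mod n (m + 1)
      -- offset identity: group g+1 of xs starts/ends q later than group g of xs.drop q
      have hoff : 0 < m → ∀ g : Nat,
          (g + 1) * base + min (g + 1) r
            = g * ((n - q) / m) + min g ((n - q) % m) + q := by
        intro hmpos g
        have hexp : (m + 1) * base = m * base + base := by ring
        have hexp2 : (g + 1) * base = g * base + base := by ring
        rcases Nat.eq_zero_or_pos r with h0 | hpos
        · have hqb : q = base := by omega
          have hsub : n - q = m * base := by omega
          have hdiv : (n - q) / m = base := by rw [hsub, Nat.mul_div_cancel_left _ hmpos]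
          have hmod : (n - q) % m = 0 := by rw [hsub, Nat.mul_mod_right]
          rw [hdiv, hmod]
          omega
        · have hqb : q = base + 1 := by omega
          have hsub : n - q = m * base + (r - 1) := by omega
          have hdiv : (n - q) / m = base := by
            rw [hsub, Nat.mul_add_div hmpos, Nat.div_eq_of_lt (by omega : r - 1 < m)]
            omega
          have hmod : (n - q) % m = r - 1 := by
            rw [hsub, Nat.mul_add_mod, Nat.mod_eq_of_lt (by omega)]
          rw [hdiv, hmod]
          omega
      rw [PySem.List.pyRange_one]
      have ht : (((m + 1 : Nat) : Int) - 0).toNat = m + 1 := by push_cast; omega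
      rw [ht, List.range_succ_eq_map, List.map_cons, List.map_cons, List.map_map,
        List.map_map]
      show _ :: _ = chunkAux xs (m + 1)
      rw [chunkAux]
      congr 1
      · -- head group is xs.take q
        rw [hB, hR]
        have e0 : (0 : Int) + ((0 : Nat) : Int) = ((0 : Nat) : Int) := by norm_num
        have h0 : ((0 : Nat) : Int) * ((base : Nat) : Int)
            + min ((0 : Nat) : Int) ((r : Nat) : Int) = ((0 : Nat) : Int) := by
          push_cast; omega
        have h1 : (((0 : Nat) : Int) + 1) * ((base : Nat) : Int)
            + min (((0 : Nat) : Int) + 1) ((r : Nat) : Int) = ((q : Nat) : Int) := by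
          rw [hqv]; push_cast; omega
        rw [e0, h0, h1, PySem.List.slice_natCast]
        simp [hqdef, hn]
      · -- tail groups are the groups of xs.drop q
        rw [← ih (xs.drop q)]
        rw [PySem.List.pyRange_one]
        have ht2 : ((m : Int) - 0).toNat = m := by omega
        rw [ht2, List.map_map]
        apply List.map_congr_left
        intro k hk
        have hkm : k < m := List.mem_range.mp hk
        have hmpos : 0 < m := by omega
        simp only [Function.comp_apply]
        rw [hB, hR]
        have hlen : ((xs.drop q).length : Int) = ((n - q : Nat) : Int) := by
          simp [hn]
        rw [hlen, PySem.Int.floordiv_natCast (n - q) m, PySem.Int.mod_natCast (n - q) m]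
        have hok := hoff hmpos k
        have hok1 := hoff hmpos (k + 1)
        have ea : (0 : Int) + ((Nat.succ k : Nat) : Int) = ((k + 1 : Nat) : Int) := by
          push_cast; ring
        have eb : (0 : Int) + ((k : Nat) : Int) = ((k : Nat) : Int) := by ring
        rw [ea, eb]
        have castA : ((k + 1 : Nat) : Int) * ((base : Nat) : Int)
            + min ((k + 1 : Nat) : Int) ((r : Nat) : Int)
            = (((k * ((n - q) / m) + min k ((n - q) % m)) + q : Nat) : Int) := by
          have h := congrArg (fun x : Nat => (x : Int)) hok
          push_cast at h ⊢
          linarith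
        have castB : (((k + 1 : Nat) : Int) + 1) * ((base : Nat) : Int)
            + min (((k + 1 : Nat) : Int) + 1) ((r : Nat) : Int)
            = ((((k + 1) * ((n - q) / m) + min (k + 1) ((n - q) % m)) + q : Nat) : Int) := by
          have h := congrArg (fun x : Nat => (x : Int)) hok1
          push_cast at h ⊢
          linarith
        have castC : ((k : Nat) : Int) * (((n - q) / m : Nat) : Int)
            + min ((k : Nat) : Int) (((n - q) % m : Nat) : Int)
            = ((k * ((n - q) / m) + min k ((n - q) % m) : Nat) : Int) := by
          push_cast; ring
        have castD : (((k : Nat) : Int) + 1) * (((n - q) / m : Nat) : Int)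
            + min (((k : Nat) : Int) + 1) (((n - q) % m : Nat) : Int)
            = (((k + 1) * ((n - q) / m) + min (k + 1) ((n - q) % m) : Nat) : Int) := by
          push_cast; ring
        rw [castA, castB, castC, castD, pv_slice_shift]

-- ===== VERDICT (by name: the statement is the Claim_ definition above) =====
theorem partition_into_groups_spec : Claim_equal_partition_into_groups := by
  intro items n_groups _ hpre
  unfold Spec_partition_into_groups partition_into_groups
  dsimp only
  by_cases hpos : 0 < n_groups
  · have hm : n_groups = ((n_groups.toNat : Nat) : Int) := by omega
    have hrem : 0 ≤ PySem.Int.mod (items.length : Int) n_groups :=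
      PySem.Int.mod_nonneg _ hpos
    rw [hm] at hrem ⊢
    rw [pv_fold_inv items _ _ hrem, pv_map_eq_chunk]
    unfold partition_into_groups_alt
    rw [hm, pv_alt_fold, List.nil_append]
  · have hle : n_groups ≤ 0 := by omega
    unfold partition_into_groups_alt
    rw [PySem.List.pyRange_one_eq_nil hle, PySem.List.pyRange_neg_one_eq_nil hle]
    simp
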